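-- pv_equiv track=rewrite | github.com/HiitsHamza/Algo | Milestone 3/src/pmcover.py | pmcover
-- ===== SOURCE A (Python) =====
-- from typing import Any, Dict, List, Set, Tuple
--
-- def pmcover(
--     sets: Dict[Tuple[Any, Any], Set[Any]],
--     budgets: Dict[Any, int],
--     k: int
-- ) -> List[Tuple[Any, Any]]:
--     """
--     Greedy 1/2-approximation for max coverage under a partition matroid.
--
--     Args:
--         sets: mapping from a pair-id (a, c) to the set of terminals it covers.
--         budgets: mapping from each 'a' to the maximum number of sets we can pick with that a.
--         k: target number of terminals to cover.
--
--     Returns: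
--         A list of selected keys (a, c) whose union of coverage has size >= k
--         or as close as possible under the budgets.
--     """
--     covered: Set[Any] = set()
--     selected: List[Tuple[Any, Any]] = []
--     budgets_remaining = budgets.copy()
--
--     while len(covered) < k:
--         best_gain = 0
--         best_key = None
--
--         # Find the set with maximum marginal gain that respects budgets
--         for key, items in sets.items():
--             a, _c = key
--             if budgets_remaining.get(a, 0) <= 0 or key in selected:
--                 continue
--             gain = len(items - covered)
--             if gain > best_gain:
--                 best_gain = gain
--                 best_key = key
--
--         # Stop if no further progress is possible
--         if best_key is None or best_gain == 0:
--             break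
--
--         # Select it
--         selected.append(best_key)
--         covered |= sets[best_key]
--         a, _ = best_key
--         budgets_remaining[a] -= 1
--
--     return selected
-- ===== SOURCE B (Python) =====
-- def pmcover(sets, budgets, k):
--     # Residual-list greedy: keep a shrinking candidate list whose item lists are
--     # pre-filtered to the still-uncovered elements, so each round is a plain
--     # first-arg-max over stored residual lengths (no per-round set differences,
--     # no membership tests against `selected`).
--     bud = dict(budgets)
--     cands = [(key, list(items)) for key, items in sets.items()
--              if bud.get(key[0], 0) > 0 and items]
--     covered_n = 0
--     selected = []
--     while covered_n < k:
--         best = None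
--         for cand in cands:
--             if best is None or len(cand[1]) > len(best[1]):
--                 best = cand
--         if best is None:
--             break
--         key, res = best
--         selected.append(key)
--         covered_n += len(res)
--         bud[key[0]] -= 1
--         newly = set(res)
--         new_cands = []
--         for kk, rr in cands:
--             if kk == key or bud.get(kk[0], 0) <= 0:
--                 continue
--             rr2 = [x for x in rr if x not in newly]
--             if rr2:
--                 new_cands.append((kk, rr2))
--         cands = new_cands
--     return selected
-- ===== Notes on version B (the rewrite author's own statement) =====
-- stated objective: faster
-- what changed: A rescans every dict entry each round, recomputing len(items - covered) against the ever-growing covered set and re-checking budgets and selected-membership; B keeps a shrinking candidate list whose item lists are pre-filtered to the still-uncovered elements (committed, budget-exhausted and emptied candidates are dropped), so each round is a plain first-arg-max over stored residual lengths; Pre_ only states the encoding invariant of the dict/set arguments (distinct keys, duplicate-free item lists).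
import Mathlib
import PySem

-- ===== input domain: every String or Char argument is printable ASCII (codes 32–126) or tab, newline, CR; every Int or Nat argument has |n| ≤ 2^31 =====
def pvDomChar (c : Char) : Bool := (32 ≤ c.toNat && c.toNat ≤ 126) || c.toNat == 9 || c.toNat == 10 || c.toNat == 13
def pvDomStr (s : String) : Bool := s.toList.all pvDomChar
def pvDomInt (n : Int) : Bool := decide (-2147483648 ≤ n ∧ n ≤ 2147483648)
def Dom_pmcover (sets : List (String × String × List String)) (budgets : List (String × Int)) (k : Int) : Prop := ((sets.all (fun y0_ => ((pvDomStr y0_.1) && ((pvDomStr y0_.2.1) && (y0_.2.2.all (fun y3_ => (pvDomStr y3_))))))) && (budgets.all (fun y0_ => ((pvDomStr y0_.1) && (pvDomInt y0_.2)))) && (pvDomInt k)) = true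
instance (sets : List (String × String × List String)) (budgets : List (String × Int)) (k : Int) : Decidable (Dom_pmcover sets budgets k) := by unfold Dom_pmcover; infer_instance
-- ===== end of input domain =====

-- B replaces A's per-round rescan (a set difference against `covered` for every still-unselected
-- set) by a shrinking candidate list whose item lists are pre-filtered to the still-uncovered
-- elements, so each round is a first-arg-max over stored residual lengths (objective: faster,
-- measured).

-- ===== PORT A =====
-- body of the inner `for key, items in sets.items()` loop, accumulating (best_gain, best_key)
def pmcoverStepA (bud : PySem.Dict String Int) (selected : List (String × String))
    (covered : PySem.Set String) (acc : Int × Option (String × String))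
    (e : String × String × List String) : Int × Option (String × String) :=
  if bud.getD e.1 0 ≤ 0 || selected.contains (e.1, e.2.1) then acc
  else  -- gain = len(items - covered)
    if ((PySem.Set.diff e.2.2 covered).length : Int) > acc.1 then
      (((PySem.Set.diff e.2.2 covered).length : Int), some (e.1, e.2.1))
    else acc

def pmcoverScanA (sets : List (String × String × List String))
    (bud : PySem.Dict String Int) (selected : List (String × String))
    (covered : PySem.Set String) : Int × Option (String × String) :=
  sets.foldl (pmcoverStepA bud selected covered) (0, none)

-- `sets[best_key]`: dict lookup, first matching key (the key is always present when used)
def pmcoverLookupA (sets : List (String × String × List String)) (key : String × String) : List String :=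
  (((sets.find? (fun e => (e.1, e.2.1) == key)).map (fun e => e.2.2))).getD []

-- the `while len(covered) < k` loop; fuel `sets.length + 1` bounds the rounds (each round
-- appends a fresh key of `sets` to `selected`, so at most `sets.length` rounds select)
def pmcoverLoopA (sets : List (String × String × List String)) (k : Int) :
    Nat → PySem.Set String → List (String × String) → PySem.Dict String Int →
    List (String × String)
  | 0, _, selected, _ => selected
  | fuel + 1, covered, selected, bud =>
    if (covered.length : Int) < k then
      let best := pmcoverScanA sets bud selected covered
      match best.2 with
      | none => selected
      | some key =>
        if best.1 = 0 then selected
        else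
          pmcoverLoopA sets k fuel
            (PySem.Set.update covered (pmcoverLookupA sets key))
            (selected ++ [key]) (bud.modify key.1 0 (· - 1))
    else selected

def pmcover (sets : List (String × String × List String)) (budgets : List (String × Int)) (k : Int) : List (String × String) :=
  pmcoverLoopA sets k (sets.length + 1) [] [] (PySem.Dict.ofList budgets)

-- ===== PORT B =====
-- body of Source B's `for cand in cands` scan: keep the first candidate with maximal residual length
def pmcoverBestB (best : Option ((String × String) × List String))
    (c : (String × String) × List String) : Option ((String × String) × List String) :=
  match best with
  | none => some c
  | some b => if c.2.length > b.2.length then some c else best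

def pmcoverPickB (cands : List ((String × String) × List String)) :
    Option ((String × String) × List String) :=
  cands.foldl pmcoverBestB none

-- rebuild of the candidate list after committing `key` (Source B's `new_cands` loop;
-- `x not in newly` is membership in the chosen residual, ported as `res.contains`)
def pmcoverStepB (cands : List ((String × String) × List String))
    (key : String × String) (bud : PySem.Dict String Int) (res : List String) :
    List ((String × String) × List String) :=
  cands.filterMap (fun c =>
    if c.1 == key || bud.getD c.1.1 0 ≤ 0 then none
    else  -- rr2 = [x for x in rr if x not in newly]
      if (c.2.filter (fun x => !(res.contains x))).isEmpty then none
      else some (c.1, c.2.filter (fun x => !(res.contains x))))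

def pmcoverLoopB (k : Int) :
    Nat → List ((String × String) × List String) → Int → List (String × String) →
    PySem.Dict String Int → List (String × String)
  | 0, _, _, selected, _ => selected
  | fuel + 1, cands, covN, selected, bud =>
    if covN < k then
      match pmcoverPickB cands with
      | none => selected
      | some c =>
        let bud' := bud.modify c.1.1 0 (· - 1)
        pmcoverLoopB k fuel (pmcoverStepB cands c.1 bud' c.2)
          (covN + c.2.length) (selected ++ [c.1]) bud'
    else selected

def pmcover_alt (sets : List (String × String × List String)) (budgets : List (String × Int)) (k : Int) : List (String × String) :=
  let bud := PySem.Dict.ofList budgets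
  pmcoverLoopB k (sets.length + 1)
    (sets.filterMap (fun e =>
      if bud.getD e.1 0 > 0 && !e.2.2.isEmpty then some ((e.1, e.2.1), e.2.2) else none))
    0 [] bud

-- ===== PRECONDITION & SPEC =====
-- Pre_ is the encoding invariant of A's Python argument types, nothing more: `sets` encodes a
-- dict (its (a, c) keys are distinct) whose values encode Python sets (each items list is
-- duplicate-free); no actual dict/set a Python caller can pass is excluded.
def Pre_pmcover (sets : List (String × String × List String)) (budgets : List (String × Int)) (k : Int) : Prop :=
  (sets.map (fun e => (e.1, e.2.1))).Nodup ∧ ∀ e ∈ sets, e.2.2.Nodup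
instance (sets : List (String × String × List String)) (budgets : List (String × Int)) (k : Int) : Decidable (Pre_pmcover sets budgets k) := by unfold Pre_pmcover; infer_instance

def pvWitness_pmcover : (List (String × String × List String)) × (List (String × Int)) × Int :=
  ([("a", "c1", ["t1", "t2"]), ("a", "c2", ["t2", "t3"]), ("b", "c1", ["t3"])],
   [("a", 1), ("b", 2)], 3)

def Spec_pmcover (sets : List (String × String × List String)) (budgets : List (String × Int)) (k : Int) (out : List (String × String)) : Prop := out = pmcover_alt sets budgets k
instance (sets : List (String × String × List String)) (budgets : List (String × Int)) (k : Int) (out : List (String × String)) : Decidable (Spec_pmcover sets budgets k out) := by unfold Spec_pmcover; infer_instance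

-- ===== CLAIM (what is proved, stated in full; the proofs are below) =====
def Claim_equal_pmcover : Prop := ∀ (sets : List (String × String × List String)) (budgets : List (String × Int)) (k : Int), Dom_pmcover sets budgets k → Pre_pmcover sets budgets k → Spec_pmcover sets budgets k (pmcover sets budgets k)

-- ===== LEMMAS AND PROOFS =====

-- the candidate entry (if any) that A's state induces for one dict entry
def candF (bud : PySem.Dict String Int) (selected : List (String × String))
    (covered : PySem.Set String) (e : String × String × List String) :
    Option ((String × String) × List String) :=
  if bud.getD e.1 0 ≤ 0 || selected.contains (e.1, e.2.1) then none
  else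
    if (PySem.Set.diff e.2.2 covered).isEmpty then none
    else some ((e.1, e.2.1), PySem.Set.diff e.2.2 covered)

-- the candidate list determined by A's state
def candsOf (sets : List (String × String × List String))
    (bud : PySem.Dict String Int) (selected : List (String × String))
    (covered : PySem.Set String) : List ((String × String) × List String) :=
  sets.filterMap (candF bud selected covered)

-- B's initial candidate list is candsOf the initial A-state
lemma candsOf_init (sets : List (String × String × List String)) (bud : PySem.Dict String Int) :
    sets.filterMap (fun e =>
      if bud.getD e.1 0 > 0 && !e.2.2.isEmpty then some ((e.1, e.2.1), e.2.2) else none)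
    = candsOf sets bud [] [] := by
  apply List.filterMap_congr
  intro e _
  unfold candF
  by_cases h1 : bud.getD e.1 0 ≤ 0
  · simp [h1]
  · by_cases h2 : e.2.2.isEmpty <;>
      simp [h1, h2, (by omega : bud.getD e.1 0 > 0), PySem.Set.diff]

-- abstraction of B's pick accumulator into A's (best_gain, best_key) accumulator
def absAcc : Option ((String × String) × List String) → Int × Option (String × String)
  | none => (0, none)
  | some c => ((c.2.length : Int), some c.1)

lemma stepA_absAcc (bud : PySem.Dict String Int) (selected : List (String × String))
    (covered : PySem.Set String) (acc : Option ((String × String) × List String))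
    (e : String × String × List String) :
    pmcoverStepA bud selected covered (absAcc acc) e
      = absAcc ((candF bud selected covered e).elim acc (pmcoverBestB acc)) := by
  unfold pmcoverStepA candF
  by_cases h1 : (decide (bud.getD e.1 0 ≤ 0) || selected.contains (e.1, e.2.1)) = true
  · rw [if_pos h1, if_pos h1]; rfl
  · rw [if_neg h1, if_neg h1]
    by_cases h2 : (PySem.Set.diff e.2.2 covered).isEmpty = true
    · have hz : ((PySem.Set.diff e.2.2 covered).length : Int) = 0 := by
        rw [List.isEmpty_iff] at h2; simp [h2]
      have hge : ¬ (((PySem.Set.diff e.2.2 covered).length : Int) > (absAcc acc).1) := by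
        rcases acc with _ | c <;> simp [absAcc, hz]
      rw [if_pos h2, if_neg hge]; rfl
    · rw [if_neg h2]
      rcases acc with _ | c
      · have hpos : ((PySem.Set.diff e.2.2 covered).length : Int) > (absAcc none).1 := by
          simp only [absAcc]
          exact_mod_cast List.length_pos_iff.mpr (by simpa [List.isEmpty_iff] using h2)
        rw [if_pos hpos]
        rfl
      · by_cases h3 : (PySem.Set.diff e.2.2 covered).length > c.2.length
        · have h3i : ((PySem.Set.diff e.2.2 covered).length : Int) > (absAcc (some c)).1 := by
            simp only [absAcc]; exact_mod_cast h3
          rw [if_pos h3i]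
          simp [pmcoverBestB, absAcc, h3]
        · have h3i : ¬ ((PySem.Set.diff e.2.2 covered).length : Int) > (absAcc (some c)).1 := by
            simp only [absAcc]; intro h; exact h3 (by exact_mod_cast h)
          rw [if_neg h3i]
          simp [pmcoverBestB, absAcc, h3]

lemma scan_fold (bud : PySem.Dict String Int) (selected : List (String × String))
    (covered : PySem.Set String) :
    ∀ (l : List (String × String × List String)) (acc : Option ((String × String) × List String)),
      l.foldl (pmcoverStepA bud selected covered) (absAcc acc)
        = absAcc ((l.filterMap (candF bud selected covered)).foldl pmcoverBestB acc) := by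
  intro l
  induction l with
  | nil => intro acc; rfl
  | cons e tl ih =>
    intro acc
    rw [List.foldl_cons, List.filterMap_cons, stepA_absAcc]
    cases h : candF bud selected covered e with
    | none => simpa [h] using ih acc
    | some c => simpa [h] using ih (pmcoverBestB acc c)

-- A's scan equals B's pick, through absAcc
lemma scanA_eq_pickB (sets : List (String × String × List String))
    (bud : PySem.Dict String Int) (selected : List (String × String))
    (covered : PySem.Set String) :
    pmcoverScanA sets bud selected covered
      = absAcc (pmcoverPickB (candsOf sets bud selected covered)) := by
  have := scan_fold bud selected covered sets none
  simpa [pmcoverScanA, pmcoverPickB, candsOf, absAcc] using this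

lemma pickB_mem {cands : List ((String × String) × List String)}
    {c : (String × String) × List String} (h : pmcoverPickB cands = some c) : c ∈ cands := by
  suffices H : ∀ (l : List ((String × String) × List String))
      (acc : Option ((String × String) × List String)),
      l.foldl pmcoverBestB acc = some c → c ∈ l ∨ acc = some c by
    rcases H cands none h with h' | h'
    · exact h'
    · simp at h'
  intro l
  induction l with
  | nil => intro acc h; right; simpa using h
  | cons hd tl ih =>
    intro acc h
    rw [List.foldl_cons] at h
    rcases ih _ h with h' | h'
    · exact Or.inl (List.mem_cons_of_mem _ h')
    · match acc, h' with
      | none, h' => left; simp [pmcoverBestB] at h'; simp [← h']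
      | some b, h' =>
        by_cases hc : hd.2.length > b.2.length
        · simp [pmcoverBestB, hc] at h'; left; simp [← h']
        · simp [pmcoverBestB, hc] at h'; right; simp [h']

lemma mem_candsOf {sets : List (String × String × List String)}
    {bud : PySem.Dict String Int} {selected : List (String × String)}
    {covered : PySem.Set String} {c : (String × String) × List String}
    (h : c ∈ candsOf sets bud selected covered) :
    ∃ e ∈ sets, (e.1, e.2.1) = c.1 ∧ PySem.Set.diff e.2.2 covered = c.2 ∧ c.2 ≠ [] := by
  rw [candsOf, List.mem_filterMap] at h
  obtain ⟨e, he, hf⟩ := h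
  unfold candF at hf
  by_cases h1 : (decide (bud.getD e.1 0 ≤ 0) || selected.contains (e.1, e.2.1)) = true
  · rw [if_pos h1] at hf; cases hf
  · rw [if_neg h1] at hf
    by_cases h2 : (PySem.Set.diff e.2.2 covered).isEmpty = true
    · rw [if_pos h2] at hf; cases hf
    · rw [if_neg h2] at hf
      injection hf with hf
      subst hf
      exact ⟨e, he, rfl, rfl, by simpa [List.isEmpty_iff] using h2⟩

-- with distinct keys, the dict lookup at a candidate's key returns that entry's items
lemma lookupA_of_mem {sets : List (String × String × List String)}
    (hnd : (sets.map (fun e => (e.1, e.2.1))).Nodup)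
    {e : String × String × List String} (he : e ∈ sets) :
    pmcoverLookupA sets (e.1, e.2.1) = e.2.2 := by
  unfold pmcoverLookupA
  induction sets with
  | nil => simp at he
  | cons hd tl ih =>
    rcases List.mem_cons.mp he with rfl | he'
    · simp
    · have hne : ((hd.1, hd.2.1) == (e.1, e.2.1)) = false := by
        simp only [List.map_cons, List.nodup_cons] at hnd
        simp only [beq_eq_false_iff_ne, ne_eq]
        intro hc
        apply hnd.1
        rw [hc]
        exact List.mem_map.mpr ⟨e, he', rfl⟩
      rw [List.find?_cons, hne]
      simp only [List.map_cons, List.nodup_cons] at hnd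
      exact ih hnd.2 he'

lemma diff_update (xs cov items : List String) :
    PySem.Set.diff xs (PySem.Set.update cov items)
      = (PySem.Set.diff xs cov).filter (fun x => !((PySem.Set.diff items cov).contains x)) := by
  show xs.filter _ = (xs.filter _).filter _
  rw [List.filter_filter]
  apply List.filter_congr
  intro x _
  simp [PySem.Set.diff, PySem.Set.mem_update]
  by_cases hx : x ∈ cov <;> by_cases hy : x ∈ items <;> simp [hx, hy]

lemma update_len (cov items : List String) (h : items.Nodup) :
    PySem.Set.update cov items = cov ++ PySem.Set.diff items cov := by
  rw [PySem.Set.update_eq_append_filter]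
  simp only [PySem.Set.ofList_eq_self_of_nodup items h]
  rfl

-- one committed round maps candsOf to candsOf of the updated A-state
lemma stepB_candsOf (sets : List (String × String × List String))
    (bud : PySem.Dict String Int) (selected : List (String × String))
    (covered : PySem.Set String) (e₀ : String × String × List String) :
    pmcoverStepB (candsOf sets bud selected covered) (e₀.1, e₀.2.1)
        (bud.modify e₀.1 0 (· - 1)) (PySem.Set.diff e₀.2.2 covered)
      = candsOf sets (bud.modify e₀.1 0 (· - 1)) (selected ++ [(e₀.1, e₀.2.1)])
          (PySem.Set.update covered e₀.2.2) := by
  unfold pmcoverStepB candsOf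
  rw [List.filterMap_filterMap]
  apply List.filterMap_congr
  intro e _
  have hbud : ∀ a, (bud.modify e₀.1 0 (· - 1)).getD a 0
      = if a = e₀.1 then bud.getD e₀.1 0 - 1 else bud.getD a 0 := by
    intro a; exact PySem.Dict.getD_modify bud e₀.1 a 0 (· - 1)
  have hdiff := diff_update e.2.2 covered e₀.2.2
  unfold candF
  by_cases h1 : bud.getD e.1 0 ≤ 0
  · have h1' : (bud.modify e₀.1 0 (· - 1)).getD e.1 0 ≤ 0 := by
      rw [hbud]; split_ifs with he
      · rw [← he] at *; omega
      · omega
    rw [if_pos (by simp [h1]), if_pos (by simp [h1'])]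
    rfl
  · by_cases hsel : (e.1, e.2.1) ∈ selected
    · rw [if_pos (by simp [hsel]), if_pos (by simp [hsel])]
      rfl
    · have hc1 : ¬ ((decide (bud.getD e.1 0 ≤ 0) || selected.contains (e.1, e.2.1)) = true) := by
        simp [h1, hsel]
      by_cases h2 : (PySem.Set.diff e.2.2 covered).isEmpty = true
      · have h2' : (PySem.Set.diff e.2.2 (PySem.Set.update covered e₀.2.2)).isEmpty = true := by
          rw [List.isEmpty_iff] at h2 ⊢; rw [hdiff, h2]; rfl
        rw [if_neg hc1, if_pos h2]
        by_cases ho : (decide ((bud.modify e₀.1 0 (· - 1)).getD e.1 0 ≤ 0)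
            || (selected ++ [(e₀.1, e₀.2.1)]).contains (e.1, e.2.1)) = true
        · rw [if_pos ho]; rfl
        · rw [if_neg ho, if_pos h2']; rfl
      · rw [if_neg hc1, if_neg h2, Option.bind_some]
        by_cases hk : (e.1, e.2.1) = (e₀.1, e₀.2.1)
        · rw [if_pos (by simp [hk]), if_pos (by simp [hk])]
        · by_cases h3 : (bud.modify e₀.1 0 (· - 1)).getD e.1 0 ≤ 0
          · rw [if_pos (by simp [h3]), if_pos (by simp [h3])]
          · have hga : ((e.1, e.2.1) == (e₀.1, e₀.2.1)) = false := by simp [hk]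
            have hgb : (decide ((bud.modify e₀.1 0 (· - 1)).getD e.1 0 ≤ 0)) = false := by
              simp [h3]
            have hgc : ((selected ++ [(e₀.1, e₀.2.1)]).contains (e.1, e.2.1)) = false := by
              simp [hsel, hk]
            simp [hga, hgb, hdiff]
            intro hcon
            rcases hcon with h | h
            · exact absurd h hsel
            · exact absurd (by simp [Prod.ext_iff]; exact ⟨h.1, h.2⟩) hk

-- the two loops agree on related states
lemma loops_eq (sets : List (String × String × List String)) (k : Int)
    (hnd : (sets.map (fun e => (e.1, e.2.1))).Nodup)
    (hni : ∀ e ∈ sets, e.2.2.Nodup) :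
    ∀ (fuel : Nat) (covered : PySem.Set String) (selected : List (String × String))
      (bud : PySem.Dict String Int),
      pmcoverLoopA sets k fuel covered selected bud
        = pmcoverLoopB k fuel (candsOf sets bud selected covered)
            (covered.length : Int) selected bud := by
  intro fuel
  induction fuel with
  | zero => intro covered selected bud; rfl
  | succ fuel ih =>
    intro covered selected bud
    rw [pmcoverLoopA, pmcoverLoopB]
    by_cases hk : (covered.length : Int) < k
    · simp only [hk, if_true]
      rw [scanA_eq_pickB]
      cases hp : pmcoverPickB (candsOf sets bud selected covered) with
      | none => rfl
      | some c =>
        obtain ⟨e₀, he₀, hke, hres, hne⟩ := mem_candsOf (pickB_mem hp)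
        have hlen : (c.2.length : Int) ≠ 0 := by
          have : c.2.length ≠ 0 := by simpa [List.length_eq_zero_iff] using hne
          omega
        simp only [absAcc, hlen, if_false]
        have hlook : pmcoverLookupA sets c.1 = e₀.2.2 := by
          rw [← hke]; exact lookupA_of_mem hnd he₀
        rw [hlook]
        have h11 : e₀.1 = c.1.1 := by rw [← hke]
        have hstep : pmcoverStepB (candsOf sets bud selected covered) c.1
            (bud.modify c.1.1 0 (· - 1)) c.2
            = candsOf sets (bud.modify c.1.1 0 (· - 1)) (selected ++ [c.1])
                (PySem.Set.update covered e₀.2.2) := by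
          have := stepB_candsOf sets bud selected covered e₀
          rw [hke, hres, h11] at this
          exact this
        have hcov : ((PySem.Set.update covered e₀.2.2).length : Int)
            = (covered.length : Int) + (c.2.length : Int) := by
          rw [update_len covered e₀.2.2 (hni e₀ he₀), hres]
          simp
        rw [ih (PySem.Set.update covered e₀.2.2) (selected ++ [c.1]) (bud.modify c.1.1 0 (· - 1)),
            hstep, hcov]
    · simp [hk]

-- ===== VERDICT (by name: the statement is the Claim_ definition above) =====
theorem pmcover_spec : Claim_equal_pmcover := by
  intro sets budgets k _ hpre
  show pmcover sets budgets k = pmcover_alt sets budgets k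
  have halt : pmcover_alt sets budgets k
      = pmcoverLoopB k (sets.length + 1)
          (sets.filterMap (fun e =>
            if (PySem.Dict.ofList budgets).getD e.1 0 > 0 && !e.2.2.isEmpty then
              some ((e.1, e.2.1), e.2.2) else none))
          0 [] (PySem.Dict.ofList budgets) := rfl
  unfold pmcover
  rw [loops_eq sets k hpre.1 hpre.2, halt, candsOf_init]
  simp
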